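-- pv_equiv track=rewrite | github.com/deadpoolg/Messfehler-Detektor | src/rules.py | finde_duplikate
-- ===== SOURCE A (Python) =====
-- def finde_duplikate(d):
--     out = []
--     i = 0
--     n = len(d) - 1
--     while i < n:
--         if d[i] == d[i+1]:
--             out.append(i)
--         i = i + 1
--     return out
-- ===== SOURCE B (Python) =====
-- def finde_duplikate(d):
--     out = []
--     pos = 0
--     n = len(d)
--     while pos < n:
--         end = pos + 1
--         while end < n and d[end] == d[pos]:
--             end = end + 1
--         out.extend(range(pos, end - 1))
--         pos = end
--     return out
-- ===== Notes on version B (the rewrite author's own statement) =====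
-- stated objective: alternative
-- what changed: B decomposes the list into maximal runs of equal elements (run-length style scan) and emits each run's index block with range(pos, end-1), instead of testing every adjacent pair individually.
import Mathlib
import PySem

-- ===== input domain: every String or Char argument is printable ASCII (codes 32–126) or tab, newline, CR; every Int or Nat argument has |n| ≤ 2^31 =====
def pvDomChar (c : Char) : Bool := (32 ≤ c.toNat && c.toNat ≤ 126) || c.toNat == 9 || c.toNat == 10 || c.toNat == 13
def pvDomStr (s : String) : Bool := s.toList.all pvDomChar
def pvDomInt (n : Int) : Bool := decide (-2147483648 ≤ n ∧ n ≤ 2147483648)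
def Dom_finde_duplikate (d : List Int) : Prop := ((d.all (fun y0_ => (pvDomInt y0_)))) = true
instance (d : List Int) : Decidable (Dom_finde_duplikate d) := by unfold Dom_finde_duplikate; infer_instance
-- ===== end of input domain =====

-- B rewrites the pairwise adjacent-equality scan as a run decomposition (alternative algorithm, same O(n) cost).


-- ===== PORT A =====
-- literal port of A's while loop: i scans while i < n, n = len(d) - 1, appending i when d[i] == d[i+1].
-- The while loop is transcribed as structural recursion on a fuel that bounds the remaining iterations.
def findeA_loop (d : List Int) (fuel : Nat) (out : List Int) (i n : Int) : List Int :=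
  match fuel with
  | 0 => out
  | fuel + 1 =>
    if i < n then
      findeA_loop d fuel
        (if PySem.List.pyGet? d i = PySem.List.pyGet? d (i+1) then out ++ [i] else out) (i+1) n
    else out

def finde_duplikate (d : List Int) : List Int :=
  findeA_loop d d.length [] 0 (PySem.List.len d - 1)

-- ===== PORT B =====
-- inner while of B: advance e while e < n and d[e] == d[pos]
def findeB_end (d : List Int) (fuel : Nat) (pos e n : Int) : Int :=
  match fuel with
  | 0 => e
  | fuel + 1 =>
    if e < n ∧ PySem.List.pyGet? d e = PySem.List.pyGet? d pos then
      findeB_end d fuel pos (e+1) n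
    else e

-- outer while of B: one maximal run per iteration, emit range(pos, end - 1)
def findeB_outer (d : List Int) (fuel : Nat) (pos n : Int) (out : List Int) : List Int :=
  match fuel with
  | 0 => out
  | fuel + 1 =>
    if pos < n then
      findeB_outer d fuel (findeB_end d fuel pos (pos+1) n) n
        (out ++ PySem.List.pyRange pos (findeB_end d fuel pos (pos+1) n - 1) 1)
    else out

def finde_duplikate_alt (d : List Int) : List Int :=
  findeB_outer d (d.length + 1) 0 (PySem.List.len d) []

-- ===== PRECONDITION & SPEC =====
def Spec_finde_duplikate (d : List Int) (out : List Int) : Prop := out = finde_duplikate_alt d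
instance (d : List Int) (out : List Int) : Decidable (Spec_finde_duplikate d out) := by unfold Spec_finde_duplikate; infer_instance

-- ===== CLAIM (what is proved, stated in full; the proofs are below) =====
def Claim_equal_finde_duplikate : Prop := ∀ (d : List Int), Dom_finde_duplikate d → Spec_finde_duplikate d (finde_duplikate d)

-- ===== LEMMAS AND PROOFS =====

-- the common value: indices j in [i, len d - 1) with d[j] == d[j+1]
def dupFrom (d : List Int) (i : Int) : List Int :=
  (PySem.List.pyRange i (PySem.List.len d - 1) 1).filter
    (fun j => decide (PySem.List.pyGet? d j = PySem.List.pyGet? d (j+1)))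

theorem dupFrom_stop (d : List Int) (i : Int) (h : ¬ i < PySem.List.len d - 1) :
    dupFrom d i = [] := by
  unfold dupFrom
  rw [PySem.List.pyRange_one_eq_nil (by omega)]
  rfl

theorem dupFrom_step (d : List Int) (i : Int) (h : i < PySem.List.len d - 1) :
    dupFrom d i =
      (if PySem.List.pyGet? d i = PySem.List.pyGet? d (i+1) then [i] else []) ++ dupFrom d (i+1) := by
  unfold dupFrom
  rw [PySem.List.pyRange_one_cons h, List.filter_cons]
  split_ifs with hc hd hd <;> simp_all

theorem findeA_loop_spec (d : List Int) (fuel : Nat) (out : List Int) (i : Int)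
    (hf : (PySem.List.len d - 1 - i).toNat ≤ fuel) :
    findeA_loop d fuel out i (PySem.List.len d - 1) = out ++ dupFrom d i := by
  induction fuel generalizing out i with
  | zero =>
    have h : ¬ i < PySem.List.len d - 1 := by omega
    rw [dupFrom_stop d i h]
    simp [findeA_loop]
  | succ k ih =>
    unfold findeA_loop
    split
    · rename_i h
      rw [ih _ (i+1) (by omega), dupFrom_step d i h]
      split_ifs <;> simp
    · rename_i h
      rw [dupFrom_stop d i h]
      simp

theorem findeB_end_spec (d : List Int) (fuel : Nat) (pos e n : Int) (he : pos < e)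
    (hf : (n - e).toNat ≤ fuel)
    (hrun : ∀ j, pos ≤ j → j < e → PySem.List.pyGet? d j = PySem.List.pyGet? d pos) :
    let r := findeB_end d fuel pos e n
    e ≤ r ∧ r ≤ max e n ∧
    (∀ j, pos ≤ j → j < r → PySem.List.pyGet? d j = PySem.List.pyGet? d pos) ∧
    (r < n → ¬ PySem.List.pyGet? d r = PySem.List.pyGet? d pos) := by
  induction fuel generalizing e with
  | zero =>
    simp only [findeB_end]
    refine ⟨le_refl e, by omega, hrun, ?_⟩
    intro hlt
    omega
  | succ k ih =>
    unfold findeB_end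
    split
    · rename_i h
      have := ih (e+1) (by omega) (by omega)
        (by intro j hj1 hj2
            by_cases hje : j < e
            · exact hrun j hj1 hje
            · have hj : j = e := by omega
              subst hj; exact h.2)
      refine ⟨by omega, by omega, this.2.2.1, this.2.2.2⟩
    · rename_i h
      push Not at h
      refine ⟨le_refl e, by omega, hrun, ?_⟩
      intro hlt
      exact h hlt

-- the run [pos, e) of equal elements contributes exactly range(pos, e-1) to dupFrom
theorem dupFrom_run (d : List Int) (pos e : Int) (hpos : pos < e)
    (he : e ≤ PySem.List.len d)
    (hrun : ∀ j, pos ≤ j → j < e → PySem.List.pyGet? d j = PySem.List.pyGet? d pos)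
    (hstop : e < PySem.List.len d → ¬ PySem.List.pyGet? d e = PySem.List.pyGet? d pos) :
    dupFrom d pos = PySem.List.pyRange pos (e-1) 1 ++ dupFrom d e := by
  by_cases hlt : pos < e - 1
  · have hpn : pos < PySem.List.len d - 1 := by omega
    have heq : PySem.List.pyGet? d pos = PySem.List.pyGet? d (pos+1) :=
      (hrun (pos+1) (by omega) (by omega)).symm
    rw [dupFrom_step d pos hpn, PySem.List.pyRange_one_cons hlt]
    rw [if_pos heq]
    rw [dupFrom_run d (pos+1) e (by omega) he
        (by intro j hj1 hj2
            rw [hrun j (by omega) hj2, hrun (pos+1) (by omega) (by omega)])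
        (by intro hl hc
            exact hstop hl (by rw [hc, hrun (pos+1) (by omega) (by omega)]))]
    simp
  · -- e = pos + 1 : the run is a single element
    have hep : e = pos + 1 := by omega
    rw [PySem.List.pyRange_one_eq_nil (by omega)]
    simp only [List.nil_append]
    by_cases hpn : pos < PySem.List.len d - 1
    · have hne : ¬ PySem.List.pyGet? d pos = PySem.List.pyGet? d (pos+1) := by
        intro hc
        exact hstop (by omega) (by rw [hep, ← hc])
      rw [dupFrom_step d pos hpn, if_neg hne, hep]
      simp
    · rw [dupFrom_stop d pos hpn, dupFrom_stop d e (by omega)]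
termination_by (e - pos).toNat
decreasing_by omega

theorem findeB_outer_spec (d : List Int) (fuel : Nat) (pos : Int) (out : List Int)
    (hpos : 0 ≤ pos) (hf : (PySem.List.len d - pos).toNat < fuel) :
    findeB_outer d fuel pos (PySem.List.len d) out = out ++ dupFrom d pos := by
  induction fuel generalizing pos out with
  | zero => omega
  | succ k ih =>
    unfold findeB_outer
    split
    · rename_i h
      have hend := findeB_end_spec d k pos (pos+1) (PySem.List.len d) (by omega) (by omega)
        (by intro j hj1 hj2
            have hj : j = pos := by omega
            rw [hj])
      set e := findeB_end d k pos (pos+1) (PySem.List.len d) with he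
      obtain ⟨h1, h2, h3, h4⟩ := hend
      have hle : e ≤ PySem.List.len d := by omega
      rw [ih e _ (by omega) (by omega),
          dupFrom_run d pos e (by omega) hle h3 h4]
      simp
    · rename_i h
      rw [dupFrom_stop d pos (by omega)]
      simp

-- ===== VERDICT (by name: the statement is the Claim_ definition above) =====
theorem finde_duplikate_spec : Claim_equal_finde_duplikate := by
  intro d _
  unfold Spec_finde_duplikate finde_duplikate finde_duplikate_alt
  rw [findeA_loop_spec d d.length [] 0 (by simp [PySem.List.len_eq]),
      findeB_outer_spec d (d.length + 1) 0 [] (le_refl 0) (by simp [PySem.List.len_eq])]
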